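-- pv_equiv track=rewrite | github.com/olsenw/LeetCodeExercises | Python3/sentence_similarity_iii.py | areSentencesSimilar_passes
-- ===== SOURCE A (Python) =====
-- from collections import deque
--
-- def areSentencesSimilar_passes(sentence1: str, sentence2: str) -> bool:
--     s1 = deque(sentence1.split())
--     s2 = deque(sentence2.split())
--     if len(s1) < len(s2):
--         s1, s2 = s2, s1
--     while s2 and s1[0] == s2[0]:
--         s1.popleft()
--         s2.popleft()
--     while s2 and s1[-1] == s2[-1]:
--         s1.pop()
--         s2.pop()
--     return len(s2) == 0
-- ===== SOURCE B (Python) =====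
-- def areSentencesSimilar_passes(sentence1: str, sentence2: str) -> bool:
--     w1 = sentence1.split()
--     w2 = sentence2.split()
--     n1, n2 = len(w1), len(w2)
--     m = min(n1, n2)
--     i = 0
--     while i < m and w1[i] == w2[i]:
--         i += 1
--     j = 0
--     while i + j < m and w1[n1 - 1 - j] == w2[n2 - 1 - j]:
--         j += 1
--     return i + j >= m
-- ===== Notes on version B (the rewrite author's own statement) =====
-- stated objective: idiomatic
-- what changed: Replaced the swap-and-mutate deque popping with pure index counters: count the common prefix length and the common suffix length (bounded so no word is counted twice) over the original word lists and compare their sum with min(n1,n2).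
import Mathlib
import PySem

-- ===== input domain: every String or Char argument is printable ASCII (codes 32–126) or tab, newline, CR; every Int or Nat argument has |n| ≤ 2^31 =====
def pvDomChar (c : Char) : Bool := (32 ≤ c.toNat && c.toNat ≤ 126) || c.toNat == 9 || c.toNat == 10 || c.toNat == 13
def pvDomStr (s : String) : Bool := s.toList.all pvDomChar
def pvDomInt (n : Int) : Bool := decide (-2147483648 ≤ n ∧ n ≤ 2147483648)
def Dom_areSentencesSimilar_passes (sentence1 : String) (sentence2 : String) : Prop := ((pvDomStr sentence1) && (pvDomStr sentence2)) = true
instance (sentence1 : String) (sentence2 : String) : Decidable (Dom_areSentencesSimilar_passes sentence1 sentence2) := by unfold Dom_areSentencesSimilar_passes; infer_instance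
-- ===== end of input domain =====

-- B replaces A's swap-and-mutate deque popping with pure index counters over the
-- original word lists (prefix/suffix match counts compared with min(n1,n2)); objective: idiomatic.


-- ===== PORT A =====
-- first while loop: pop matching heads while s2 nonempty (s1[0] when s1 is empty would
-- raise in Python; unreachable there since s1 is kept at least as long as s2, modelled by head?)
def pvLoop1 : List String → List String → List String × List String
  | a, [] => (a, [])
  | a, y :: bs => if a.head? = some y then pvLoop1 a.tail bs else (a, y :: bs)

-- second while loop: pop matching last elements while s2 nonempty
def pvLoop2 (a b : List String) : List String × List String :=
  if b = [] then (a, b)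
  else if a.getLast? = b.getLast? then pvLoop2 a.dropLast b.dropLast
  else (a, b)
termination_by b.length
decreasing_by
  rename_i h _
  have := List.length_pos_of_ne_nil h
  simp [List.length_dropLast]; omega

def areSentencesSimilar_passes (sentence1 : String) (sentence2 : String) : Bool :=
  let p := PySem.Str.split₀ sentence1
  let q := PySem.Str.split₀ sentence2
  let ab := if p.length < q.length then (q, p) else (p, q)
  let r1 := pvLoop1 ab.1 ab.2
  let r2 := pvLoop2 r1.1 r1.2
  decide (r2.2.length = 0)

-- ===== PORT B =====
-- while i < m and w1[i] == w2[i]: i += 1   (i < m ≤ len keeps the index in range)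
def pvCntPref (w1 w2 : List String) (m i : Nat) : Nat :=
  if i < m then
    if w1.getD i "" = w2.getD i "" then pvCntPref w1 w2 m (i + 1) else i
  else i
termination_by m - i

-- while i + j < m and w1[n1-1-j] == w2[n2-1-j]: j += 1
def pvCntSuf (w1 w2 : List String) (n1 n2 m i j : Nat) : Nat :=
  if i + j < m then
    if w1.getD (n1 - 1 - j) "" = w2.getD (n2 - 1 - j) "" then
      pvCntSuf w1 w2 n1 n2 m i (j + 1)
    else j
  else j
termination_by m - (i + j)

def areSentencesSimilar_passes_alt (sentence1 : String) (sentence2 : String) : Bool :=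
  let w1 := PySem.Str.split₀ sentence1
  let w2 := PySem.Str.split₀ sentence2
  let n1 := w1.length
  let n2 := w2.length
  let m := min n1 n2
  let i := pvCntPref w1 w2 m 0
  let j := pvCntSuf w1 w2 n1 n2 m i 0
  decide (m ≤ i + j)

-- ===== PRECONDITION & SPEC =====
def Spec_areSentencesSimilar_passes (sentence1 : String) (sentence2 : String) (out : Bool) : Prop := out = areSentencesSimilar_passes_alt sentence1 sentence2
instance (sentence1 : String) (sentence2 : String) (out : Bool) : Decidable (Spec_areSentencesSimilar_passes sentence1 sentence2 out) := by unfold Spec_areSentencesSimilar_passes; infer_instance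

-- ===== CLAIM (what is proved, stated in full; the proofs are below) =====
def Claim_equal_areSentencesSimilar_passes : Prop := ∀ (sentence1 : String) (sentence2 : String), Dom_areSentencesSimilar_passes sentence1 sentence2 → Spec_areSentencesSimilar_passes sentence1 sentence2 (areSentencesSimilar_passes sentence1 sentence2)

-- ===== LEMMAS AND PROOFS =====

-- length of the longest common prefix of two lists
def pvCp : List String → List String → Nat
  | x :: xs, y :: ys => if x = y then pvCp xs ys + 1 else 0
  | _, _ => 0

theorem pvCp_nil_left (v : List String) : pvCp [] v = 0 := by cases v <;> rfl
theorem pvCp_nil_right (u : List String) : pvCp u [] = 0 := by cases u <;> rfl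

theorem pvCp_le_left : ∀ (u v : List String), pvCp u v ≤ u.length := by
  intro u; induction u with
  | nil => intro v; simp [pvCp_nil_left]
  | cons x xs ih =>
    intro v; cases v with
    | nil => simp [pvCp_nil_right]
    | cons y ys => simp only [pvCp]; split <;> simp [Nat.succ_le_succ (ih ys)]

theorem pvCp_le_right : ∀ (u v : List String), pvCp u v ≤ v.length := by
  intro u; induction u with
  | nil => intro v; simp [pvCp_nil_left]
  | cons x xs ih =>
    intro v; cases v with
    | nil => simp [pvCp_nil_right]
    | cons y ys => simp only [pvCp]; split <;> simp [Nat.succ_le_succ (ih ys)]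

theorem pvCp_comm : ∀ (u v : List String), pvCp u v = pvCp v u := by
  intro u; induction u with
  | nil => intro v; simp [pvCp_nil_left, pvCp_nil_right]
  | cons x xs ih =>
    intro v; cases v with
    | nil => simp [pvCp_nil_left, pvCp_nil_right]
    | cons y ys =>
      simp only [pvCp]
      by_cases h : x = y
      · simp [h, ih ys]
      · have h' : ¬ y = x := fun hh => h (Eq.symm hh)
        simp [h, h']

theorem pvCp_take : ∀ (u v : List String) (k l : Nat),
    pvCp (u.take k) (v.take l) = min (pvCp u v) (min k l) := by
  intro u; induction u with
  | nil => intro v k l; simp [pvCp_nil_left]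
  | cons x xs ih =>
    intro v k l
    cases v with
    | nil => simp [pvCp_nil_right]
    | cons y ys =>
      cases k with
      | zero => simp [pvCp_nil_left]
      | succ k' =>
        cases l with
        | zero => simp [pvCp_nil_right]
        | succ l' =>
          simp only [List.take_succ_cons, pvCp]
          split
          · rw [ih ys k' l']; omega
          · omega

theorem pvLoop1_eq : ∀ (b a : List String),
    pvLoop1 a b = (a.drop (pvCp a b), b.drop (pvCp a b)) := by
  intro b; induction b with
  | nil => intro a; simp [pvLoop1, pvCp_nil_right]
  | cons y bs ih =>
    intro a
    cases a with
    | nil => simp [pvLoop1, pvCp_nil_left]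
    | cons x xs =>
      simp only [pvLoop1, pvCp, List.head?_cons, List.tail_cons, Option.some.injEq]
      by_cases h : x = y
      · simp [h, ih xs]
      · simp [h]

theorem pv_dropLast_rev (l : List String) : l.reverse.tail.reverse = l.dropLast := by
  rcases hr : l.reverse with _ | ⟨x, xs⟩
  · have : l = [] := by simpa using congrArg List.reverse hr
    simp [this]
  · have hl : l = xs.reverse ++ [x] := by
      have := congrArg List.reverse hr; simpa using this
    simp [hl]

theorem pvLoop2_eq : ∀ (n : Nat) (a b : List String), b.length = n →
    pvLoop2 a b = ((pvLoop1 a.reverse b.reverse).1.reverse, (pvLoop1 a.reverse b.reverse).2.reverse) := by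
  intro n
  induction n with
  | zero =>
    intro a b hb
    have : b = [] := List.eq_nil_of_length_eq_zero hb
    subst this
    rw [pvLoop2]; simp [pvLoop1]
  | succ n ih =>
    intro a b hb
    rcases hr : b.reverse with _ | ⟨y, ys⟩
    · exfalso
      have : b = [] := by simpa using congrArg List.reverse hr
      simp [this] at hb
    · have hbne : b ≠ [] := by
        intro h; rw [h] at hr; simp at hr
      have hglast : b.getLast? = some y := by
        rw [← List.head?_reverse, hr]; rfl
      rw [pvLoop2]
      simp only [if_neg hbne]
      by_cases hg : a.getLast? = b.getLast?
      · rw [if_pos hg]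
        have hahead : a.reverse.head? = some y := by
          rw [List.head?_reverse, hg, hglast]
        have h1 : a.dropLast.reverse = a.reverse.tail := by
          rw [← pv_dropLast_rev a]; simp
        have h2 : b.dropLast.reverse = ys := by
          rw [← pv_dropLast_rev b]; simp [hr]
        have hlen : b.dropLast.length = n := by
          simp [List.length_dropLast]; omega
        rw [ih a.dropLast b.dropLast hlen, h1, h2]
        simp only [pvLoop1]
        rw [if_pos hahead]
      · rw [if_neg hg]
        have hahead : a.reverse.head? ≠ some y := by
          rw [List.head?_reverse]; intro h; exact hg (h.trans hglast.symm)
        simp only [pvLoop1, if_neg hahead]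
        simp [← hr]

theorem pvCntPref_eq : ∀ (d : Nat) (w1 w2 : List String) (m i : Nat), m - i = d →
    i ≤ m → m ≤ w1.length → m ≤ w2.length →
    pvCntPref w1 w2 m i = i + min (pvCp (w1.drop i) (w2.drop i)) (m - i) := by
  intro d
  induction d with
  | zero =>
    intro w1 w2 m i hd hi h1 h2
    rw [pvCntPref]
    have : ¬ i < m := by omega
    simp [this]; omega
  | succ d ih =>
    intro w1 w2 m i hd hi h1 h2
    have him : i < m := by omega
    have hi1 : i < w1.length := by omega
    have hi2 : i < w2.length := by omega
    rw [pvCntPref, if_pos him]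
    rw [List.getD_eq_getElem w1 "" hi1, List.getD_eq_getElem w2 "" hi2]
    rw [List.drop_eq_getElem_cons hi1, List.drop_eq_getElem_cons hi2]
    by_cases h : w1[i] = w2[i]
    · rw [if_pos h]
      rw [ih w1 w2 m (i + 1) (by omega) (by omega) h1 h2]
      simp only [pvCp, if_pos h]
      omega
    · rw [if_neg h]
      simp only [pvCp, if_neg h]
      omega

theorem pvCntSuf_eq : ∀ (d : Nat) (w1 w2 : List String) (m i j : Nat), m - (i + j) = d →
    m ≤ w1.length → m ≤ w2.length →
    pvCntSuf w1 w2 w1.length w2.length m i j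
      = j + min (pvCp (w1.reverse.drop j) (w2.reverse.drop j)) (m - i - j) := by
  intro d
  induction d with
  | zero =>
    intro w1 w2 m i j hd h1 h2
    rw [pvCntSuf]
    have : ¬ i + j < m := by omega
    simp [this]; omega
  | succ d ih =>
    intro w1 w2 m i j hd h1 h2
    have hij : i + j < m := by omega
    have hj1 : j < w1.reverse.length := by simp; omega
    have hj2 : j < w2.reverse.length := by simp; omega
    have e1 : w1.getD (w1.length - 1 - j) "" = w1.reverse[j]'hj1 := by
      rw [List.getElem_reverse]
      exact List.getD_eq_getElem w1 "" (by omega)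
    have e2 : w2.getD (w2.length - 1 - j) "" = w2.reverse[j]'hj2 := by
      rw [List.getElem_reverse]
      exact List.getD_eq_getElem w2 "" (by omega)
    rw [pvCntSuf, if_pos hij, e1, e2]
    rw [List.drop_eq_getElem_cons hj1, List.drop_eq_getElem_cons hj2]
    by_cases h : w1.reverse[j]'hj1 = w2.reverse[j]'hj2
    · rw [if_pos h]
      rw [ih w1 w2 m i (j + 1) (by omega) h1 h2]
      simp only [pvCp, if_pos h]
      omega
    · rw [if_neg h]
      simp only [pvCp, if_neg h]
      omega

theorem pv_Aside (a b : List String) (hba : b.length ≤ a.length) :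
    ((pvLoop2 (pvLoop1 a b).1 (pvLoop1 a b).2).2.length = 0)
    ↔ (b.length ≤ pvCp a b + pvCp a.reverse b.reverse) := by
  rw [pvLoop1_eq b a]
  set c := pvCp a b with hcdef
  have hc : c ≤ b.length := pvCp_le_right a b
  have hca : c ≤ a.length := pvCp_le_left a b
  rw [pvLoop2_eq (b.drop c).length (a.drop c) (b.drop c) rfl]
  rw [pvLoop1_eq]
  have hc2 : pvCp (a.drop c).reverse (b.drop c).reverse
      = min (pvCp a.reverse b.reverse) (min (a.length - c) (b.length - c)) := by
    rw [List.reverse_drop, List.reverse_drop, pvCp_take]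
  have hs : pvCp a.reverse b.reverse ≤ b.length := by
    have := pvCp_le_right a.reverse b.reverse
    simpa using this
  simp only [List.length_reverse, List.length_drop]
  omega

theorem pv_Bside (w1 w2 : List String) :
    (min w1.length w2.length ≤ pvCntPref w1 w2 (min w1.length w2.length) 0
       + pvCntSuf w1 w2 w1.length w2.length (min w1.length w2.length)
           (pvCntPref w1 w2 (min w1.length w2.length) 0) 0)
    ↔ (min w1.length w2.length ≤ pvCp w1 w2 + pvCp w1.reverse w2.reverse) := by
  set m := min w1.length w2.length with hm
  have h1 : m ≤ w1.length := by omega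
  have h2 : m ≤ w2.length := by omega
  have hj := pvCntSuf_eq (m - (pvCntPref w1 w2 m 0 + 0)) w1 w2 m (pvCntPref w1 w2 m 0) 0 rfl h1 h2
  have hi := pvCntPref_eq (m - 0) w1 w2 m 0 rfl (Nat.zero_le m) h1 h2
  simp only [List.drop_zero] at hi hj
  rw [hj, hi]
  have hc : pvCp w1 w2 ≤ w2.length := pvCp_le_right w1 w2
  have hs : pvCp w1.reverse w2.reverse ≤ w2.length := by
    have := pvCp_le_right w1.reverse w2.reverse
    simpa using this
  omega

theorem pv_main (p q : List String) :
    decide ((pvLoop2 (pvLoop1 (if p.length < q.length then (q, p) else (p, q)).1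
                        (if p.length < q.length then (q, p) else (p, q)).2).1
                     (pvLoop1 (if p.length < q.length then (q, p) else (p, q)).1
                        (if p.length < q.length then (q, p) else (p, q)).2).2).2.length = 0)
    = decide (min p.length q.length ≤ pvCntPref p q (min p.length q.length) 0
        + pvCntSuf p q p.length q.length (min p.length q.length)
            (pvCntPref p q (min p.length q.length) 0) 0) := by
  rw [decide_eq_decide, pv_Bside p q]
  by_cases h : p.length < q.length
  · simp only [if_pos h]
    rw [pv_Aside q p (le_of_lt h)]
    rw [pvCp_comm q p, pvCp_comm q.reverse p.reverse]
    omega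
  · simp only [if_neg h]
    rw [pv_Aside p q (by omega)]
    omega

-- ===== VERDICT (by name: the statement is the Claim_ definition above) =====
theorem areSentencesSimilar_passes_spec : Claim_equal_areSentencesSimilar_passes := by
  intro s1 s2 _
  unfold Spec_areSentencesSimilar_passes
  exact pv_main (PySem.Str.split₀ s1) (PySem.Str.split₀ s2)
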